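-- pv_equiv track=rewrite | github.com/hnatiukr/aoc-2025 | day09/solution.py | generate_border_points
-- ===== SOURCE A (Python) =====
-- from typing import TypeAlias
--
-- Point: TypeAlias = tuple[int, int]
--
-- def generate_border_points(point_a: Point, point_b: Point) -> set[Point]:
--     points = set()
--     x_min, x_max = min(point_a[0], point_b[0]), max(point_a[0], point_b[0])
--     y_min, y_max = min(point_a[1], point_b[1]), max(point_a[1], point_b[1])
--
--     # horizontal edges
--     points.update((x, point_a[1]) for x in range(x_min, x_max + 1))
--     points.update((x, point_b[1]) for x in range(x_min, x_max + 1))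
--
--     # vertical edges
--     points.update((point_a[0], y) for y in range(y_min, y_max + 1))
--     points.update((point_b[0], y) for y in range(y_min, y_max + 1))
--
--     return points
-- ===== SOURCE B (Python) =====
-- def generate_border_points(point_a, point_b):
--     xa, ya = point_a
--     xb, yb = point_b
--     x_min, x_max = min(xa, xb), max(xa, xb)
--     y_min, y_max = min(ya, yb), max(ya, yb)
--     w = x_max - x_min + 1
--     rows = 1 if ya == yb else 2
--     cols = 1 if xa == xb else 2
--     inner = (y_max - y_min + 1) - rows
--
--     def point_at(k):
--         if k < w:
--             return (x_min + k, ya)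
--         if k < rows * w:
--             return (x_min + (k - w), yb)
--         m = k - rows * w
--         if m < inner:
--             return (xa, y_min + 1 + m)
--         return (xb, y_min + 1 + (m - inner))
--
--     return {point_at(k) for k in range(rows * w + cols * inner)}
-- ===== Notes on version B (the rewrite author's own statement) =====
-- stated objective: alternative
-- what changed: A enumerates four overlapping edge ranges and relies on set updates to drop duplicate points; B instead computes a closed-form count of border points (rows*width + cols*interior) and decodes each index k in range(total) arithmetically into its point, so the border is produced by a random-access index formula with no duplicate generation and no membership tests.
import Mathlib
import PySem

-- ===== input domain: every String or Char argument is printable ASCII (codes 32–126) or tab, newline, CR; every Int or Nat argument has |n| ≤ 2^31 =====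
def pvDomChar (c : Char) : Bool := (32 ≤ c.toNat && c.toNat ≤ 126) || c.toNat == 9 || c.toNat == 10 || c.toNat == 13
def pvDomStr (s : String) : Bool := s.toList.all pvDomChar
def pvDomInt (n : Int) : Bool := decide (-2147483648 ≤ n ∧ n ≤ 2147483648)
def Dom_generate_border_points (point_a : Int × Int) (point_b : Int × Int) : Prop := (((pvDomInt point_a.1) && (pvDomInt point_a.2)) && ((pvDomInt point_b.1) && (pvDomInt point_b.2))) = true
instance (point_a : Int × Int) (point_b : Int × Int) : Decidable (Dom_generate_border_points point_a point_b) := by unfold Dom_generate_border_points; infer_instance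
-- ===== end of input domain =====

-- B replaces A's four overlapping edge enumerations deduplicated by set updates with a closed-form
-- construction: it counts the border points and decodes each index k of range(total) arithmetically
-- into its point; same returned set. (objective: alternative)

-- ===== PORT A =====
def generate_border_points (point_a : Int × Int) (point_b : Int × Int) : List (Int × Int) :=
  let points : PySem.Set (Int × Int) := PySem.Set.empty
  let x_min := min point_a.1 point_b.1
  let x_max := max point_a.1 point_b.1
  let y_min := min point_a.2 point_b.2
  let y_max := max point_a.2 point_b.2
  -- horizontal edges
  let points := PySem.Set.update points ((PySem.List.pyRange x_min (x_max + 1) 1).map (fun x => (x, point_a.2)))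
  let points := PySem.Set.update points ((PySem.List.pyRange x_min (x_max + 1) 1).map (fun x => (x, point_b.2)))
  -- vertical edges
  let points := PySem.Set.update points ((PySem.List.pyRange y_min (y_max + 1) 1).map (fun y => (point_a.1, y)))
  let points := PySem.Set.update points ((PySem.List.pyRange y_min (y_max + 1) 1).map (fun y => (point_b.1, y)))
  points

-- ===== PORT B =====
-- Source B's nested helper point_at(k), with its free variables passed explicitly
def gbpPointAt (x_min ya yb xa xb y_min w rows inner : Int) (k : Int) : Int × Int :=
  if k < w then (x_min + k, ya)
  else if k < rows * w then (x_min + (k - w), yb)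
  else
    let m := k - rows * w
    if m < inner then (xa, y_min + 1 + m) else (xb, y_min + 1 + (m - inner))

def generate_border_points_alt (point_a : Int × Int) (point_b : Int × Int) : List (Int × Int) :=
  let xa := point_a.1
  let ya := point_a.2
  let xb := point_b.1
  let yb := point_b.2
  let x_min := min xa xb
  let x_max := max xa xb
  let y_min := min ya yb
  let y_max := max ya yb
  let w := x_max - x_min + 1
  let rows : Int := if ya = yb then 1 else 2
  let cols : Int := if xa = xb then 1 else 2
  let inner := (y_max - y_min + 1) - rows
  PySem.Set.ofList ((PySem.List.pyRange 0 (rows * w + cols * inner) 1).map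
    (gbpPointAt x_min ya yb xa xb y_min w rows inner))

-- ===== PRECONDITION & SPEC =====
def Spec_generate_border_points (point_a : Int × Int) (point_b : Int × Int) (out : List (Int × Int)) : Prop := out = generate_border_points_alt point_a point_b
instance (point_a : Int × Int) (point_b : Int × Int) (out : List (Int × Int)) : Decidable (Spec_generate_border_points point_a point_b out) := by unfold Spec_generate_border_points; infer_instance

-- ===== CLAIM (what is proved, stated in full; the proofs are below) =====
def Claim_equal_generate_border_points : Prop := ∀ (point_a : Int × Int) (point_b : Int × Int), Dom_generate_border_points point_a point_b → Spec_generate_border_points point_a point_b (generate_border_points point_a point_b)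

-- ===== LEMMAS AND PROOFS =====

-- a set-update loop over a Nodup list appends exactly the fresh elements
theorem update_eq_append_filter {α : Type} [BEq α] [LawfulBEq α] (l : List α) (s : List α)
    (hl : l.Nodup) :
    PySem.Set.update s l = s ++ l.filter (fun x => !(s.contains x)) := by
  induction l generalizing s with
  | nil => simp [PySem.Set.update]
  | cons x t ih =>
    obtain ⟨hx, ht⟩ := List.nodup_cons.mp hl
    have hstep : PySem.Set.update s (x :: t) = PySem.Set.update (PySem.Set.add s x) t := rfl
    by_cases hmem : x ∈ s
    · rw [hstep, PySem.Set.add_of_mem hmem, ih _ ht]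
      simp [hmem]
    · rw [hstep, PySem.Set.add_of_not_mem hmem, ih _ ht]
      have : t.filter (fun y => !((s ++ [x]).contains y)) = t.filter (fun y => !(s.contains y)) := by
        apply List.filter_congr
        intro y hy
        have : y ≠ x := fun h => hx (h ▸ hy)
        simp [List.contains_eq_mem, this]
      rw [this]
      simp [hmem, List.append_assoc]

-- set(l) of a Nodup list is l itself
theorem ofList_eq_self {α : Type} [BEq α] [LawfulBEq α] (l : List α) (hl : l.Nodup) :
    PySem.Set.ofList l = l := by
  have h : PySem.Set.ofList l = PySem.Set.update [] l := rfl
  rw [h, update_eq_append_filter l [] hl]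
  simp

-- A's four-update chain equals the duplicate-free row/column concatenation (abstract form)
theorem chain_eq (xs ys : List Int) (xa ya xb yb : Int)
    (hxs : xs.Nodup) (hys : ys.Nodup)
    (hxa : xa ∈ xs) (hxb : xb ∈ xs) (hya : ya ∈ ys) (hyb : yb ∈ ys) :
    PySem.Set.update (PySem.Set.update (PySem.Set.update (PySem.Set.update
        (PySem.Set.empty) (xs.map (fun x => (x, ya)))) (xs.map (fun x => (x, yb))))
        (ys.map (fun y => (xa, y)))) (ys.map (fun y => (xb, y)))
    = ((xs.map (fun x => (x, ya)) ++ (if yb ≠ ya then xs.map (fun x => (x, yb)) else []))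
       ++ ((ys.filter (fun y => decide (y ≠ ya ∧ y ≠ yb))).map (fun y => (xa, y)) ++
           (if xb ≠ xa then (ys.filter (fun y => decide (y ≠ ya ∧ y ≠ yb))).map (fun y => (xb, y)) else []))) := by
  have injx : ∀ c : Int, Function.Injective (fun x : Int => (x, c)) := by
    intro c a b h; simpa using h
  have injy : ∀ c : Int, Function.Injective (fun y : Int => (c, y)) := by
    intro c a b h; simpa using h
  have memS2 : ∀ p : Int × Int,
      p ∈ (xs.map (fun x => (x, ya)) ++ (if yb ≠ ya then xs.map (fun x => (x, yb)) else []))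
      ↔ (p.1 ∈ xs ∧ (p.2 = ya ∨ p.2 = yb)) := by
    intro p
    by_cases hy : yb = ya <;>
      simp [hy, List.mem_append, List.mem_map, Prod.ext_iff] <;> aesop
  have memS3 : ∀ p : Int × Int,
      p ∈ ((xs.map (fun x => (x, ya)) ++ (if yb ≠ ya then xs.map (fun x => (x, yb)) else []))
          ++ (ys.filter (fun y => decide (y ≠ ya ∧ y ≠ yb))).map (fun y => (xa, y)))
      ↔ ((p.1 ∈ xs ∧ (p.2 = ya ∨ p.2 = yb)) ∨ (p.1 = xa ∧ p.2 ∈ ys ∧ p.2 ≠ ya ∧ p.2 ≠ yb)) := by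
    intro p
    rw [List.mem_append, memS2 p]
    simp [List.mem_map, List.mem_filter, Prod.ext_iff]
    aesop
  have h1 : PySem.Set.update PySem.Set.empty (xs.map (fun x => (x, ya))) = xs.map (fun x => (x, ya)) := by
    rw [update_eq_append_filter _ _ (hxs.map (injx ya))]
    simp [PySem.Set.empty]
  have h2 : PySem.Set.update (xs.map (fun x => (x, ya))) (xs.map (fun x => (x, yb)))
      = xs.map (fun x => (x, ya)) ++ (if yb ≠ ya then xs.map (fun x => (x, yb)) else []) := by
    rw [update_eq_append_filter _ _ (hxs.map (injx yb))]
    congr 1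
    by_cases hy : yb = ya
    · subst hy
      simp only [ne_eq, not_true_eq_false, if_false]
      rw [List.filter_eq_nil_iff]
      intro a ha
      obtain ⟨x, hx', rfl⟩ := List.mem_map.mp ha
      simp only [Bool.not_eq_eq_eq_not, Bool.not_true, List.contains_eq_mem,
        decide_eq_false_iff_not, not_not]
      exact ha
    · simp only [ne_eq, hy, not_false_eq_true, if_true]
      rw [List.filter_eq_self]
      intro a ha
      obtain ⟨x, hx', rfl⟩ := List.mem_map.mp ha
      simp [List.contains_eq_mem, List.mem_map, Prod.ext_iff]
      exact Or.inr fun h => hy h.symm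
  have h3 : PySem.Set.update (xs.map (fun x => (x, ya)) ++ (if yb ≠ ya then xs.map (fun x => (x, yb)) else []))
        (ys.map (fun y => (xa, y)))
      = (xs.map (fun x => (x, ya)) ++ (if yb ≠ ya then xs.map (fun x => (x, yb)) else []))
        ++ (ys.filter (fun y => decide (y ≠ ya ∧ y ≠ yb))).map (fun y => (xa, y)) := by
    rw [update_eq_append_filter _ _ (hys.map (injy xa))]
    congr 1
    rw [List.filter_map]
    congr 1
    apply List.filter_congr
    intro y hy
    rw [Bool.eq_iff_iff]
    simp only [Function.comp, Bool.not_eq_eq_eq_not, Bool.not_true, List.contains_eq_mem,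
      decide_eq_true_eq, decide_eq_false_iff_not]
    rw [memS2 (xa, y)]
    simp [hxa]
  have h4 : PySem.Set.update ((xs.map (fun x => (x, ya)) ++ (if yb ≠ ya then xs.map (fun x => (x, yb)) else []))
        ++ (ys.filter (fun y => decide (y ≠ ya ∧ y ≠ yb))).map (fun y => (xa, y)))
        (ys.map (fun y => (xb, y)))
      = ((xs.map (fun x => (x, ya)) ++ (if yb ≠ ya then xs.map (fun x => (x, yb)) else []))
        ++ (ys.filter (fun y => decide (y ≠ ya ∧ y ≠ yb))).map (fun y => (xa, y)))
        ++ (if xb ≠ xa then (ys.filter (fun y => decide (y ≠ ya ∧ y ≠ yb))).map (fun y => (xb, y)) else []) := by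
    rw [update_eq_append_filter _ _ (hys.map (injy xb))]
    congr 1
    rw [List.filter_map]
    by_cases hx : xb = xa
    · subst hx
      simp only [ne_eq, not_true_eq_false, if_false]
      rw [List.map_eq_nil_iff, List.filter_eq_nil_iff]
      intro y hy
      simp only [Function.comp, Bool.not_eq_eq_eq_not, Bool.not_true,
        List.contains_eq_mem, decide_eq_false_iff_not, not_not]
      rw [memS3 (xb, y)]
      by_cases h1 : y = ya
      · exact Or.inl ⟨hxb, Or.inl h1⟩
      · by_cases h2 : y = yb
        · exact Or.inl ⟨hxb, Or.inr h2⟩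
        · exact Or.inr ⟨rfl, hy, h1, h2⟩
    · simp only [ne_eq, hx, not_false_eq_true, if_true]
      congr 1
      apply List.filter_congr
      intro y hy
      rw [Bool.eq_iff_iff]
      simp only [Function.comp, Bool.not_eq_eq_eq_not, Bool.not_true, List.contains_eq_mem,
        decide_eq_true_eq, decide_eq_false_iff_not]
      rw [memS3 (xb, y)]
      simp [hxb, hx]
  rw [h1, h2, h3, h4, List.append_assoc]

-- the interior-y filter is the open range between min and max
theorem filter_interior (ya yb : Int) :
    (PySem.List.pyRange (min ya yb) (max ya yb + 1) 1).filter (fun y => decide (y ≠ ya ∧ y ≠ yb))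
    = PySem.List.pyRange (min ya yb + 1) (max ya yb) 1 := by
  by_cases h : ya = yb
  · subst h
    rw [min_self, max_self, PySem.List.pyRange_one_singleton,
      PySem.List.pyRange_one_eq_nil (by omega)]
    simp
  · have hlt : min ya yb < max ya yb := by omega
    rw [PySem.List.pyRange_one_cons (by omega), PySem.List.pyRange_one_succ_right (by omega)]
    have hmm : min ya yb = ya ∨ min ya yb = yb := by omega
    have hMM : max ya yb = ya ∨ max ya yb = yb := by omega
    rw [List.filter_cons, List.filter_append]
    have p1 : (decide (min ya yb ≠ ya ∧ min ya yb ≠ yb)) = false := by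
      simp only [decide_eq_false_iff_not, not_and_or, not_not, ne_eq]
      tauto
    have p2 : List.filter (fun y => decide (y ≠ ya ∧ y ≠ yb)) [max ya yb] = [] := by
      simp only [List.filter_cons, List.filter_nil]
      have : (decide (max ya yb ≠ ya ∧ max ya yb ≠ yb)) = false := by
        simp only [decide_eq_false_iff_not, not_and_or, not_not, ne_eq]
        tauto
      rw [this]
      simp
    have p3 : (PySem.List.pyRange (min ya yb + 1) (max ya yb) 1).filter
        (fun y => decide (y ≠ ya ∧ y ≠ yb)) = PySem.List.pyRange (min ya yb + 1) (max ya yb) 1 := by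
      rw [List.filter_eq_self]
      intro y hy
      rw [PySem.List.mem_pyRange_one] at hy
      simp only [decide_eq_true_eq, ne_eq]
      omega
    rw [p1, p2, p3]
    simp

-- one index segment of B's decoding equals a mapped range
theorem seg_eq (a b c d : Int) (f g : Int → Int × Int)
    (hlen : (b - a).toNat = (d - c).toNat)
    (hpt : ∀ k : Nat, (k : Int) < b - a → f (a + k) = g (c + k)) :
    (PySem.List.pyRange a b 1).map f = (PySem.List.pyRange c d 1).map g := by
  rw [PySem.List.pyRange_one, PySem.List.pyRange_one, List.map_map, List.map_map, hlen]
  apply List.map_congr_left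
  intro k hk
  rw [List.mem_range] at hk
  simp only [Function.comp]
  exact hpt k (by omega)

-- B's index decoding produces exactly the duplicate-free row/column concatenation
theorem mapB_eq (xa ya xb yb : Int) :
    (PySem.List.pyRange 0
        ((if ya = yb then (1:Int) else 2) * (max xa xb - min xa xb + 1)
          + (if xa = xb then (1:Int) else 2) * ((max ya yb - min ya yb + 1) - (if ya = yb then (1:Int) else 2))) 1).map
      (gbpPointAt (min xa xb) ya yb xa xb (min ya yb) (max xa xb - min xa xb + 1)
        (if ya = yb then (1:Int) else 2) ((max ya yb - min ya yb + 1) - (if ya = yb then (1:Int) else 2)))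
    = (((PySem.List.pyRange (min xa xb) (max xa xb + 1) 1).map (fun x => (x, ya))
        ++ (if yb ≠ ya then (PySem.List.pyRange (min xa xb) (max xa xb + 1) 1).map (fun x => (x, yb)) else []))
       ++ (((PySem.List.pyRange (min ya yb) (max ya yb + 1) 1).filter (fun y => decide (y ≠ ya ∧ y ≠ yb))).map (fun y => (xa, y))
        ++ (if xb ≠ xa then ((PySem.List.pyRange (min ya yb) (max ya yb + 1) 1).filter (fun y => decide (y ≠ ya ∧ y ≠ yb))).map (fun y => (xb, y)) else []))) := by
  rw [filter_interior]
  set xm := min xa xb with hxm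
  set xM := max xa xb with hxM
  set ym := min ya yb with hym
  set yM := max ya yb with hyM
  have hx : xm ≤ xM := by omega
  have hy : ym ≤ yM := by omega
  by_cases hyy : ya = yb
  · -- one row, no interior
    have hymM : ym = yM := by omega
    have hI : (yM - ym + 1) - (1:Int) = 0 := by omega
    have hnil : PySem.List.pyRange (ym + 1) yM 1 = [] := PySem.List.pyRange_one_eq_nil (by omega)
    simp only [hyy, if_true, ne_eq, not_true_eq_false, if_false, hI, hnil,
      List.map_nil, List.append_nil, ite_self, mul_zero, add_zero, one_mul]
    exact seg_eq 0 (xM - xm + 1) xm (xM + 1)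
      (gbpPointAt xm yb yb xa xb ym (xM - xm + 1) 1 0) (fun x => (x, yb))
      (by omega)
      (by intro k hk
          simp only [gbpPointAt, zero_add]
          rw [if_pos (by omega)])
  · -- two rows
    have hymM : ym < yM := by omega
    have hy' : ¬ yb = ya := fun h => hyy h.symm
    simp only [hyy, if_false, ne_eq, hy', not_false_eq_true, if_true]
    set w := xM - xm + 1 with hwdef
    set inner := (yM - ym + 1) - (2:Int) with hidef
    have hw : (0:Int) < w := by omega
    have hinner : 0 ≤ inner := by omega
    have hseg1 : (PySem.List.pyRange 0 w 1).map (gbpPointAt xm ya yb xa xb ym w 2 inner)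
        = (PySem.List.pyRange xm (xM + 1) 1).map (fun x => (x, ya)) :=
      seg_eq 0 w xm (xM + 1) _ _ (by omega)
        (by intro k hk
            simp only [gbpPointAt, zero_add]
            rw [if_pos (by omega)])
    have hseg2 : (PySem.List.pyRange w (2 * w) 1).map (gbpPointAt xm ya yb xa xb ym w 2 inner)
        = (PySem.List.pyRange xm (xM + 1) 1).map (fun x => (x, yb)) :=
      seg_eq w (2 * w) xm (xM + 1) _ _ (by omega)
        (by intro k hk
            simp only [gbpPointAt]
            rw [if_neg (by omega), if_pos (by omega),
              show w + (k:Int) - w = (k:Int) from by omega])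
    have hseg3 : (PySem.List.pyRange (2 * w) (2 * w + inner) 1).map (gbpPointAt xm ya yb xa xb ym w 2 inner)
        = (PySem.List.pyRange (ym + 1) yM 1).map (fun y => (xa, y)) :=
      seg_eq (2 * w) (2 * w + inner) (ym + 1) yM _ _ (by omega)
        (by intro k hk
            simp only [gbpPointAt]
            rw [if_neg (by omega), if_neg (by omega)]
            rw [if_pos (by omega), show 2 * w + (k:Int) - 2 * w = (k:Int) from by omega])
    have hseg4 : (PySem.List.pyRange (2 * w + inner) (2 * w + 2 * inner) 1).map (gbpPointAt xm ya yb xa xb ym w 2 inner)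
        = (PySem.List.pyRange (ym + 1) yM 1).map (fun y => (xb, y)) :=
      seg_eq (2 * w + inner) (2 * w + 2 * inner) (ym + 1) yM _ _ (by omega)
        (by intro k hk
            simp only [gbpPointAt]
            rw [if_neg (by omega), if_neg (by omega)]
            rw [if_neg (by omega), show 2 * w + inner + (k:Int) - 2 * w - inner = (k:Int) from by omega])
    by_cases hxx : xa = xb
    · simp only [hxx, if_true, one_mul, not_true_eq_false, if_false, List.append_nil]
      have split1 : PySem.List.pyRange 0 (2 * w + inner) 1
          = (PySem.List.pyRange 0 w 1 ++ PySem.List.pyRange w (2 * w) 1)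
            ++ PySem.List.pyRange (2 * w) (2 * w + inner) 1 := by
        rw [PySem.List.pyRange_one_append 0 (2 * w) (2 * w + inner) (by omega) (by omega),
          PySem.List.pyRange_one_append 0 w (2 * w) (by omega) (by omega)]
      rw [split1, List.map_append, List.map_append]
      rw [hxx] at hseg1 hseg2 hseg3
      rw [hseg1, hseg2, hseg3]
    · have hx' : ¬ xb = xa := fun h => hxx h.symm
      simp only [hxx, if_false, hx', not_false_eq_true, if_true]
      have split1 : PySem.List.pyRange 0 (2 * w + 2 * inner) 1
          = (PySem.List.pyRange 0 w 1 ++ PySem.List.pyRange w (2 * w) 1)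
            ++ (PySem.List.pyRange (2 * w) (2 * w + inner) 1
              ++ PySem.List.pyRange (2 * w + inner) (2 * w + 2 * inner) 1) := by
        rw [PySem.List.pyRange_one_append 0 (2 * w) (2 * w + 2 * inner) (by omega) (by omega),
          PySem.List.pyRange_one_append 0 w (2 * w) (by omega) (by omega),
          PySem.List.pyRange_one_append (2 * w) (2 * w + inner) (2 * w + 2 * inner) (by omega) (by omega)]
      rw [split1, List.map_append, List.map_append, List.map_append]
      rw [hseg1, hseg2, hseg3, hseg4]

-- the row/column concatenation has no duplicates
theorem rhs_nodup (xs ys : List Int) (xa ya xb yb : Int)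
    (hxs : xs.Nodup) (hys : ys.Nodup) :
    ((xs.map (fun x => (x, ya)) ++ (if yb ≠ ya then xs.map (fun x => (x, yb)) else []))
     ++ ((ys.filter (fun y => decide (y ≠ ya ∧ y ≠ yb))).map (fun y => (xa, y)) ++
         (if xb ≠ xa then (ys.filter (fun y => decide (y ≠ ya ∧ y ≠ yb))).map (fun y => (xb, y)) else []))).Nodup := by
  have injx : ∀ c : Int, Function.Injective (fun x : Int => (x, c)) := by
    intro c a b h; simpa using h
  have injy : ∀ c : Int, Function.Injective (fun y : Int => (c, y)) := by
    intro c a b h; simpa using h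
  have nR : ∀ c : Int, (xs.map (fun x => (x, c))).Nodup := fun c => hxs.map (injx c)
  have nC : ∀ c : Int, ((ys.filter (fun y => decide (y ≠ ya ∧ y ≠ yb))).map (fun y => (c, y))).Nodup :=
    fun c => (hys.filter _).map (injy c)
  rw [List.nodup_append]
  refine ⟨?_, ?_, ?_⟩
  · by_cases hy : yb = ya
    · simp only [hy, ne_eq, not_true_eq_false, if_false, List.append_nil]
      exact nR ya
    · simp only [ne_eq, hy, not_false_eq_true, if_true]
      rw [List.nodup_append]
      refine ⟨nR ya, nR yb, ?_⟩
      intro p hp q hq h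
      obtain ⟨x, _, rfl⟩ := List.mem_map.mp hp
      obtain ⟨x', _, rfl⟩ := List.mem_map.mp hq
      exact hy ((Prod.ext_iff.mp h).2).symm
  · by_cases hx : xb = xa
    · simp only [hx, ne_eq, not_true_eq_false, if_false, List.append_nil]
      exact nC xa
    · simp only [ne_eq, hx, not_false_eq_true, if_true]
      rw [List.nodup_append]
      refine ⟨nC xa, nC xb, ?_⟩
      intro p hp q hq h
      obtain ⟨y, _, rfl⟩ := List.mem_map.mp hp
      obtain ⟨y', _, rfl⟩ := List.mem_map.mp hq
      exact hx ((Prod.ext_iff.mp h).1).symm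
  · intro p hp q hq hpq
    subst hpq
    have h2 : p.2 = ya ∨ p.2 = yb := by
      rcases List.mem_append.mp hp with h | h
      · obtain ⟨x, _, rfl⟩ := List.mem_map.mp h
        exact Or.inl rfl
      · by_cases hy : yb = ya
        · simp [hy] at h
        · simp only [ne_eq, hy, not_false_eq_true, if_true] at h
          obtain ⟨x, _, rfl⟩ := List.mem_map.mp h
          exact Or.inr rfl
    have h3 : p.2 ≠ ya ∧ p.2 ≠ yb := by
      rcases List.mem_append.mp hq with h | h
      · obtain ⟨y, hy', rfl⟩ := List.mem_map.mp h
        have := (List.mem_filter.mp hy').2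
        simpa using this
      · by_cases hx : xb = xa
        · simp [hx] at h
        · simp only [ne_eq, hx, not_false_eq_true, if_true] at h
          obtain ⟨y, hy', rfl⟩ := List.mem_map.mp h
          have := (List.mem_filter.mp hy').2
          simpa using this
    tauto

-- ===== VERDICT (by name: the statement is the Claim_ definition above) =====
theorem generate_border_points_spec : Claim_equal_generate_border_points := by
  intro pa pb _
  unfold Spec_generate_border_points generate_border_points generate_border_points_alt
  have hxs := PySem.List.nodup_pyRange_one (min pa.1 pb.1) (max pa.1 pb.1 + 1)
  have hys := PySem.List.nodup_pyRange_one (min pa.2 pb.2) (max pa.2 pb.2 + 1)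
  have hxa : pa.1 ∈ PySem.List.pyRange (min pa.1 pb.1) (max pa.1 pb.1 + 1) 1 := by
    rw [PySem.List.mem_pyRange_one]; omega
  have hxb : pb.1 ∈ PySem.List.pyRange (min pa.1 pb.1) (max pa.1 pb.1 + 1) 1 := by
    rw [PySem.List.mem_pyRange_one]; omega
  have hya : pa.2 ∈ PySem.List.pyRange (min pa.2 pb.2) (max pa.2 pb.2 + 1) 1 := by
    rw [PySem.List.mem_pyRange_one]; omega
  have hyb : pb.2 ∈ PySem.List.pyRange (min pa.2 pb.2) (max pa.2 pb.2 + 1) 1 := by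
    rw [PySem.List.mem_pyRange_one]; omega
  simp only []
  rw [chain_eq _ _ _ _ _ _ hxs hys hxa hxb hya hyb, mapB_eq pa.1 pa.2 pb.1 pb.2]
  exact (ofList_eq_self _ (rhs_nodup _ _ _ _ _ _ hxs hys)).symm
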